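-- pv_equiv track=rewrite | github.com/edwin-hao-ai/Awareness-SDK | python/memory_cloud/client.py | _compact_events
-- ===== SOURCE A (Python) =====
-- from typing import Any, Callable, Dict, Iterable, List, Optional, Tuple, Union
--
-- _MIN_EVENT_CHARS = 8
--
-- def _compact_events(
--     events: List[Dict[str, Any]],
--     max_events: int = 12,
--     max_chars_per_event: int = 480,
--     max_total_chars: int = 3600,
-- ) -> List[str]:
--     """Compact events for extraction LLM input.
--
--     Events shorter than ``_MIN_EVENT_CHARS`` are dropped — they carry no
--     substantive information (e.g. "ok", "hi", heartbeat pings).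
--     """
--     compacted: List[str] = []
--     total = 0
--     for event in events[:max_events]:
--         text = str(event.get("content", "")).strip()
--         if len(text) < _MIN_EVENT_CHARS:
--             continue
--         text = text[:max_chars_per_event]
--         if total + len(text) > max_total_chars:
--             break
--         compacted.append(text)
--         total += len(text)
--     return compacted
-- ===== SOURCE B (Python) =====
-- from itertools import accumulate
--
-- _MIN_EVENT_CHARS = 8
--
--
-- def _compact_events(
--     events,
--     max_events: int = 12,
--     max_chars_per_event: int = 480,
--     max_total_chars: int = 3600,
-- ):
--     # Phase 1: filter out short events and truncate each survivor.
--     texts = [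
--         t[:max_chars_per_event]
--         for e in events[:max_events]
--         if len(t := str(e.get("content", "")).strip()) >= _MIN_EVENT_CHARS
--     ]
--     # Phase 2: keep the prefix whose running total never exceeds the budget.
--     totals = accumulate(len(t) for t in texts)
--     cut = next((i for i, s in enumerate(totals) if s > max_total_chars), len(texts))
--     return texts[:cut]
-- ===== Notes on version B (the rewrite author's own statement) =====
-- stated objective: alternative
-- what changed: Replaced the single fused loop (filter + truncate + budget check + break) with a two-phase pipeline: a filtering/truncating comprehension builds the candidate texts, then itertools.accumulate over their lengths finds the first index whose running total exceeds the budget and the list is cut there.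
import Mathlib
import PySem

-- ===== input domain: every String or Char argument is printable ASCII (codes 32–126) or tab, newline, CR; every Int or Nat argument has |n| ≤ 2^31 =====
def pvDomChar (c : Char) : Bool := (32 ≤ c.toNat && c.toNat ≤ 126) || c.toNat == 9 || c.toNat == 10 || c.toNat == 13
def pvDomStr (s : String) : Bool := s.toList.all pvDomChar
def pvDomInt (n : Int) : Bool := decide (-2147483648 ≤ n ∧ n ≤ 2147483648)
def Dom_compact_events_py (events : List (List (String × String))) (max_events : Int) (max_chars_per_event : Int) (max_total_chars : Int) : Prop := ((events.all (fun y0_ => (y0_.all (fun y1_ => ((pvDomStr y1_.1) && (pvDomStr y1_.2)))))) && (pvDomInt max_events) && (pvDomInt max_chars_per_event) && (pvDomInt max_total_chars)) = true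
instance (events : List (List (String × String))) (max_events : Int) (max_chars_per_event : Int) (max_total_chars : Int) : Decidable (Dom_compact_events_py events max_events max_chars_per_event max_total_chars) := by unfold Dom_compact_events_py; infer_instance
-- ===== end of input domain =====

-- B replaces A's fused filter/truncate/budget loop with a two-phase pipeline (filter-and-truncate, then cut at the first running total over budget); objective: alternative decomposition, same cost.

-- ===== PORT A =====
-- A's loop, transliterated: accumulator (compacted, total); 'break' returns compacted.
def ceLoopA (l : List (List (String × String))) (max_chars_per_event max_total_chars : Int)
    (compacted : List String) (total : Int) : List String :=
  match l with
  | [] => compacted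
  | event :: tl =>
    let text := PySem.Str.strip ((PySem.Dict.mk event).getD "content" "")
    if (PySem.Str.len text : Int) < 8 then
      ceLoopA tl max_chars_per_event max_total_chars compacted total
    else
      let text2 := PySem.Str.slice text none (some max_chars_per_event)
      if total + (PySem.Str.len text2 : Int) > max_total_chars then compacted
      else ceLoopA tl max_chars_per_event max_total_chars (compacted ++ [text2])
             (total + (PySem.Str.len text2 : Int))

def compact_events_py (events : List (List (String × String))) (max_events : Int) (max_chars_per_event : Int) (max_total_chars : Int) : List String :=
  ceLoopA (PySem.List.slice events none (some max_events)) max_chars_per_event max_total_chars [] 0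

-- ===== PORT B =====
-- B phase 1: the filtering/truncating comprehension.
def ceTexts (evs : List (List (String × String))) (max_chars_per_event : Int) : List String :=
  evs.filterMap (fun e =>
    let t := PySem.Str.strip ((PySem.Dict.mk e).getD "content" "")
    if 8 ≤ (PySem.Str.len t : Int) then some (PySem.Str.slice t none (some max_chars_per_event)) else none)

-- B phase 2: itertools.accumulate over the lengths (running totals).
def ceTotals (ts : List String) (acc : Int) : List Int :=
  match ts with
  | [] => []
  | t :: r => (acc + (PySem.Str.len t : Int)) :: ceTotals r (acc + (PySem.Str.len t : Int))

-- B phase 2: first index whose running total exceeds the budget (default: length).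
def ceCut (sums : List Int) (max_total_chars : Int) : Nat :=
  match sums with
  | [] => 0
  | s :: r => if s > max_total_chars then 0 else 1 + ceCut r max_total_chars

def compact_events_py_alt (events : List (List (String × String))) (max_events : Int) (max_chars_per_event : Int) (max_total_chars : Int) : List String :=
  let texts := ceTexts (PySem.List.slice events none (some max_events)) max_chars_per_event
  texts.take (ceCut (ceTotals texts 0) max_total_chars)

-- ===== PRECONDITION & SPEC =====
def Spec_compact_events_py (events : List (List (String × String))) (max_events : Int) (max_chars_per_event : Int) (max_total_chars : Int) (out : List String) : Prop := out = compact_events_py_alt events max_events max_chars_per_event max_total_chars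
instance (events : List (List (String × String))) (max_events : Int) (max_chars_per_event : Int) (max_total_chars : Int) (out : List String) : Decidable (Spec_compact_events_py events max_events max_chars_per_event max_total_chars out) := by unfold Spec_compact_events_py; infer_instance

-- ===== CLAIM (what is proved, stated in full; the proofs are below) =====
def Claim_equal_compact_events_py : Prop := ∀ (events : List (List (String × String))) (max_events : Int) (max_chars_per_event : Int) (max_total_chars : Int), Dom_compact_events_py events max_events max_chars_per_event max_total_chars → Spec_compact_events_py events max_events max_chars_per_event max_total_chars (compact_events_py events max_events max_chars_per_event max_total_chars)

-- ===== LEMMAS AND PROOFS =====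

-- proof-side intermediate: the budget-limited prefix of a list of texts
def prefixFit (ts : List String) (total max_total_chars : Int) : List String :=
  match ts with
  | [] => []
  | t :: r =>
    if total + (PySem.Str.len t : Int) > max_total_chars then []
    else t :: prefixFit r (total + (PySem.Str.len t : Int)) max_total_chars

theorem ceLoopA_eq_prefixFit (l : List (List (String × String))) (mcpe mtc : Int) :
    ∀ (acc : List String) (total : Int),
      ceLoopA l mcpe mtc acc total = acc ++ prefixFit (ceTexts l mcpe) total mtc := by
  induction l with
  | nil => intro acc total; simp [ceLoopA, ceTexts, prefixFit]
  | cons e tl ih =>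
    intro acc total
    simp only [ceLoopA, ceTexts, List.filterMap_cons]
    by_cases h : (PySem.Str.len (PySem.Str.strip ((PySem.Dict.mk e).getD "content" "")) : Int) < 8
    · have h2 : ¬ ((8:Int) ≤ (PySem.Str.len (PySem.Str.strip ((PySem.Dict.mk e).getD "content" "")) : Int)) := by omega
      rw [if_pos h, if_neg h2]
      exact ih acc total
    · have h2 : (8:Int) ≤ (PySem.Str.len (PySem.Str.strip ((PySem.Dict.mk e).getD "content" "")) : Int) := by omega
      rw [if_neg h, if_pos h2]
      simp only [prefixFit]
      by_cases hb : total + (PySem.Str.len (PySem.Str.slice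
          (PySem.Str.strip ((PySem.Dict.mk e).getD "content" "")) none (some mcpe)) : Int) > mtc
      · rw [if_pos hb, if_pos hb]; simp
      · rw [if_neg hb, if_neg hb, ih]
        simp [ceTexts]

theorem take_cut_eq_prefixFit (ts : List String) (mtc : Int) :
    ∀ (total : Int), ts.take (ceCut (ceTotals ts total) mtc) = prefixFit ts total mtc := by
  induction ts with
  | nil => intro total; simp [ceTotals, ceCut, prefixFit]
  | cons t r ih =>
    intro total
    simp only [ceTotals, ceCut, prefixFit]
    by_cases hb : total + (PySem.Str.len t : Int) > mtc
    · rw [if_pos hb, if_pos hb]; simp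
    · rw [if_neg hb, if_neg hb]
      have : 1 + ceCut (ceTotals r (total + (PySem.Str.len t : Int))) mtc
           = (ceCut (ceTotals r (total + (PySem.Str.len t : Int))) mtc) + 1 := by omega
      rw [this]
      simp [List.take_succ_cons, ih]

-- ===== VERDICT (by name: the statement is the Claim_ definition above) =====
theorem compact_events_py_spec : Claim_equal_compact_events_py := by
  intro events me mcpe mtc _
  unfold Spec_compact_events_py compact_events_py compact_events_py_alt
  rw [ceLoopA_eq_prefixFit, take_cut_eq_prefixFit]
  simp
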